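-- pv_equiv track=rewrite | github.com/posl/comment_recommendation | script/split_gen/3_time/zh/216_C/8.py | solve
-- ===== SOURCE A (Python) =====
-- def solve(n):
--     s = ''
--     while n != 0:
--         if n % 2 == 1:
--             s = 'A' + s
--             n -= 1
--         else:
--             s = 'B' + s
--             n //= 2
--     return s
-- ===== SOURCE B (Python) =====
-- def solve(n):
--     # Phase 1: collect the binary digits of n, least significant first.
--     bits = []
--     m = n
--     while m > 0:
--         bits.append(m % 2)
--         m //= 2
--     if not bits:
--         return ''
--     # Phase 2: build the answer forward from the most significant bit:
--     # the leading 1-bit contributes 'A'; every later bit contributes 'B'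
--     # (a doubling) plus 'A' if the bit is set (an increment).
--     out = ['A']
--     for b in reversed(bits[:-1]):
--         out.append('B')
--         if b:
--             out.append('A')
--     return ''.join(out)
-- ===== Notes on version B (the rewrite author's own statement) =====
-- stated objective: alternative
-- what changed: Replaces A's single subtract-or-halve loop that prepends characters to an accumulator string by a two-phase algorithm: first collect the binary digits of n (LSB first), then build the string forward from the MSB, emitting 'A' for the leading bit and 'B' (+'A' if set) for each later bit.
import Mathlib
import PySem

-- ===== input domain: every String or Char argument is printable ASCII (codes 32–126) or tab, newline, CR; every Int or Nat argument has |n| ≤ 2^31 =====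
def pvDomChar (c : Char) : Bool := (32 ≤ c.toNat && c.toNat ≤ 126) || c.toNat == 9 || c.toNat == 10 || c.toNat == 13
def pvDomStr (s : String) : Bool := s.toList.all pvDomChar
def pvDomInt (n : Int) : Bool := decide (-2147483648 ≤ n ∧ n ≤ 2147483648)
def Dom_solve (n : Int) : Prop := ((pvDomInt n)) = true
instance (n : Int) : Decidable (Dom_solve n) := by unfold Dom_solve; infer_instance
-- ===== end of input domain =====

-- B replaces A's subtract-or-halve loop that prepends to a string by a two-phase
-- algorithm: collect the binary digits of n, then build the string forward from the
-- most significant bit (objective: alternative).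

-- ===== PORT A =====
-- A's while loop, ported with fuel to make it total (on 0 ≤ n the fuel n.toNat + 1
-- always suffices, so the loop body is followed exactly; on n < 0 Python A loops forever).
def solveFuel : Nat → Int → String → String
  | 0, _, s => s
  | f + 1, n, s =>
    if n = 0 then s
    else if PySem.Int.mod n 2 = 1 then solveFuel f (n - 1) ("A" ++ s)
    else solveFuel f (PySem.Int.floordiv n 2) ("B" ++ s)

def solve (n : Int) : String := solveFuel (n.toNat + 1) n ""

-- ===== PORT B =====
-- phase 1 of Source B: the 'while m > 0' loop collecting binary digits, LSB first
def bitsLoop (m : Int) : List Int :=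
  if _h : 0 < m then PySem.Int.mod m 2 :: bitsLoop (PySem.Int.floordiv m 2) else []
termination_by m.toNat
decreasing_by
  rw [PySem.Int.floordiv_eq_ediv_of_pos (by norm_num)]
  omega

-- the body of Source B's 'for b in reversed(bits[:-1])' loop
def step (acc : List Char) (b : Int) : List Char :=
  acc ++ ('B' :: (if b ≠ 0 then ['A'] else []))

def solve_alt (n : Int) : String :=
  match bitsLoop n with
  | [] => ""
  | bits => String.ofList ((bits.dropLast).reverse.foldl step ['A'])

-- ===== PRECONDITION & SPEC =====
-- Pre_ excludes n < 0, on which Python A's while loop never terminates.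
def Pre_solve (n : Int) : Prop := 0 ≤ n
instance (n : Int) : Decidable (Pre_solve n) := by unfold Pre_solve; infer_instance
def pvWitness_solve : Int := (6)
def Spec_solve (n : Int) (out : String) : Prop := out = solve_alt n
instance (n : Int) (out : String) : Decidable (Spec_solve n out) := by unfold Spec_solve; infer_instance

-- ===== CLAIM (what is proved, stated in full; the proofs are below) =====
def Claim_equal_solve : Prop := ∀ (n : Int), Dom_solve n → Pre_solve n → Spec_solve n (solve n)

-- ===== LEMMAS AND PROOFS =====

lemma bitsLoop_nonpos {m : Int} (h : m ≤ 0) : bitsLoop m = [] := by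
  rw [bitsLoop, dif_neg (by omega)]

lemma bitsLoop_pos {m : Int} (h : 0 < m) : bitsLoop m = m % 2 :: bitsLoop (m / 2) := by
  rw [bitsLoop, dif_pos h, PySem.Int.mod_eq_emod_of_pos (by norm_num),
    PySem.Int.floordiv_eq_ediv_of_pos (by norm_num)]

lemma bitsLoop_ne_nil {m : Int} (h : 0 < m) : bitsLoop m ≠ [] := by
  rw [bitsLoop_pos h]; simp

lemma build_cons (b : Int) {t : List Int} (ht : t ≠ []) :
    ((b :: t).dropLast).reverse.foldl step ['A'] =
      (t.dropLast).reverse.foldl step ['A'] ++ ('B' :: (if b ≠ 0 then ['A'] else [])) := by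
  rw [List.dropLast_cons_of_ne_nil ht, List.reverse_cons, List.foldl_append]
  simp [step, List.foldl]

lemma alt_nonpos {n : Int} (h : n ≤ 0) : solve_alt n = "" := by
  unfold solve_alt
  rw [bitsLoop_nonpos h]

lemma alt_chars {n : Int} (h : 0 < n) :
    solve_alt n = String.ofList (((bitsLoop n).dropLast).reverse.foldl step ['A']) := by
  unfold solve_alt
  rcases hb : bitsLoop n with _ | ⟨b, t⟩
  · exact absurd hb (bitsLoop_ne_nil h)
  · simp

lemma alt_odd {n : Int} (h : 0 < n) (ho : n % 2 = 1) : solve_alt n = solve_alt (n - 1) ++ "A" := by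
  by_cases h1 : n = 1
  · subst h1
    have e1 : bitsLoop 1 = [1] := by
      rw [bitsLoop_pos one_pos]; norm_num [bitsLoop_nonpos]
    rw [alt_chars one_pos, e1, alt_nonpos (by norm_num)]
    decide
  · have h3 : 3 ≤ n := by omega
    have ht : bitsLoop (n / 2) ≠ [] := bitsLoop_ne_nil (by omega)
    have en : bitsLoop n = 1 :: bitsLoop (n / 2) := by rw [bitsLoop_pos h, ho]
    have en' : bitsLoop (n - 1) = 0 :: bitsLoop (n / 2) := by
      rw [bitsLoop_pos (by omega : (0:Int) < n - 1)]
      have : (n - 1) % 2 = 0 := by omega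
      have : (n - 1) / 2 = n / 2 := by omega
      simp_all
    rw [alt_chars h, alt_chars (by omega : (0:Int) < n - 1), en, en',
      build_cons 1 ht, build_cons 0 ht]
    norm_num
    rw [String.append_assoc, show String.ofList ['B'] ++ "A" = String.ofList ['B', 'A'] from by decide]

lemma alt_even {n : Int} (h : 0 < n) (he : n % 2 = 0) : solve_alt n = solve_alt (n / 2) ++ "B" := by
  have h2 : 2 ≤ n := by omega
  have ht : bitsLoop (n / 2) ≠ [] := bitsLoop_ne_nil (by omega)
  have en : bitsLoop n = 0 :: bitsLoop (n / 2) := by rw [bitsLoop_pos h, he]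
  rw [alt_chars h, alt_chars (by omega : (0:Int) < n / 2), en, build_cons 0 ht]
  norm_num

lemma solve_key (k : Nat) : ∀ (n : Int) (f : Nat) (s : String), 0 ≤ n → n.toNat ≤ k →
    n.toNat < f → solveFuel f n s = solve_alt n ++ s := by
  induction k with
  | zero =>
    intro n f s hn hk hf
    have hz : n = 0 := by omega
    have h0 : solve_alt 0 = "" := alt_nonpos (by norm_num)
    match f with
    | f' + 1 => simp [hz, solveFuel, h0]
  | succ k ih =>
    intro n f s hn hk hf
    match f with
    | f' + 1 =>
      by_cases hz : n = 0
      · have h0 : solve_alt 0 = "" := alt_nonpos (by norm_num)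
        simp [hz, solveFuel, h0]
      · have hm : PySem.Int.mod n 2 = n % 2 := PySem.Int.mod_eq_emod_of_pos (by norm_num)
        have hd : PySem.Int.floordiv n 2 = n / 2 := PySem.Int.floordiv_eq_ediv_of_pos (by norm_num)
        by_cases hodd : n % 2 = 1
        · have := ih (n - 1) f' ("A" ++ s) (by omega) (by omega) (by omega)
          simp [solveFuel, hz, hodd, this, alt_odd (by omega) hodd, String.append_assoc]
        · have hmod : n % 2 = 0 := by omega
          have := ih (n / 2) f' ("B" ++ s) (by omega) (by omega) (by omega)
          simp [solveFuel, hz, hmod, this, alt_even (by omega) hmod, String.append_assoc]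

-- ===== VERDICT (by name: the statement is the Claim_ definition above) =====
theorem solve_spec : Claim_equal_solve := by
  intro n _ hpre
  unfold Spec_solve solve
  rw [solve_key n.toNat n (n.toNat + 1) "" hpre le_rfl (by omega)]
  simp
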